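-- pv_equiv track=rewrite | github.com/rnjsvlfwp/algorithm | week_4/homework/03_get_all_ways_of_theater_seat.py | get_all_ways_of_theater_seat
-- ===== SOURCE A (Python) =====
-- memo = {
--     1: 1,
--     2: 2
-- }
--
-- def fibo(n, memoi):
--     if n in memoi:
--         return memoi[n]
--
--     nth_fibo = fibo(n - 1, memoi) + fibo(n - 2, memoi)
--     memoi[n] = nth_fibo
--     return nth_fibo
--
-- def get_all_ways_of_theater_seat(total_count, fixed_seat_array):
--     fixed_seat_array_length = len(fixed_seat_array)
--     result = 1
--     for index in range(fixed_seat_array_length + 1):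
--         if index == 0:
--             seats = fixed_seat_array[index] - 1
--         elif 0 < index < fixed_seat_array_length:
--             seats = fixed_seat_array[index] - fixed_seat_array[index - 1] - 1
--         else:
--             seats = total_count - fixed_seat_array[index - 1]
--
--         if seats == 0:
--             seats = 1
--
--         if seats not in memo:
--             fibo(seats, memo)
--
--         result *= memo[seats]
--     return result
-- ===== SOURCE B (Python) =====
-- def _ways(run):
--     # arrangements of one run of `run` free seats: f(0)=1, f(1)=1, f(2)=2, f(n)=f(n-1)+f(n-2)
--     a, b = 1, 1
--     for _ in range(run):
--         a, b = b, a + b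
--     return a
--
-- def get_all_ways_of_theater_seat(total_count, fixed_seat_array):
--     # boolean occupancy mask, stored back-to-front (seat k sits at index total_count - k)
--     occupied = [False] * total_count
--     for seat in fixed_seat_array:
--         occupied[total_count - seat] = True
--     result = 1
--     run = 0
--     for taken in occupied:
--         if taken:
--             result *= _ways(run)
--             run = 0
--         else:
--             run += 1
--     return result * _ways(run)
-- ===== Notes on version B (the rewrite author's own statement) =====
-- stated objective: alternative
-- what changed: B marks the fixed seats in a boolean occupancy mask (stored back-to-front) and scans it once, accumulating the length of each free run and multiplying in an iterative two-accumulator Fibonacci value per run, replacing A's index-gap loop with its globally memoised recursive Fibonacci; …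
import Mathlib
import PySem

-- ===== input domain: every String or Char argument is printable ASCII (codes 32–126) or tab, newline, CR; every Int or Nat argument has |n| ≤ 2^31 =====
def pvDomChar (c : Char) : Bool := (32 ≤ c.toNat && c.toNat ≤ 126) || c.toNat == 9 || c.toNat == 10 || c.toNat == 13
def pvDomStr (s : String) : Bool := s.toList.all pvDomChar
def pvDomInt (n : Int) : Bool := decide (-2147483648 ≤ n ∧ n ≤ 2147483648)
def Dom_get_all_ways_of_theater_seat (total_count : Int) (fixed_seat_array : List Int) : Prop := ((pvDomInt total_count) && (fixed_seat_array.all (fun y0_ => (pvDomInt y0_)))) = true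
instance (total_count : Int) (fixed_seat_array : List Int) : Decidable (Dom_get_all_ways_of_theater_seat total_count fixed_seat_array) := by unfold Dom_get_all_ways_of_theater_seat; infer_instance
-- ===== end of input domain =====

-- B marks the fixed seats in a boolean occupancy mask (stored back-to-front) and scans it once,
-- multiplying an iterative two-accumulator Fibonacci value per free run — an alternative to A's
-- index-gap loop with its memoised recursive Fibonacci. Return values only: A also mutates the
-- module-level memo dict across calls; B keeps no such state.

-- ===== PORT A =====
-- fibo(n, memoi) with memo threaded as state; fuel (= n.toNat + 1 at the call site) only makes
-- the same recursion total — under Pre_ it never runs out.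
def fiboA : Nat → Int → PySem.Dict Int Int → Int × PySem.Dict Int Int
  | 0, _, m => (0, m)   -- unreachable under Pre_
  | fuel + 1, n, m =>
    match m.get? n with
    | some v => (v, m)
    | none =>
      let r1 := fiboA fuel (n - 1) m
      let r2 := fiboA fuel (n - 2) r1.2
      let v := r1.1 + r2.1
      (v, r2.2.insert n v)

-- one iteration of A's `for index in range(len+1)` loop, state = (result, memo)
def bodyA (total_count : Int) (fixed_seat_array : List Int)
    (st : Int × PySem.Dict Int Int) (index : Int) : Int × PySem.Dict Int Int :=
  let L : Int := (fixed_seat_array.length : Int)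
  let seats : Int :=
    if index = 0 then PySem.List.pyGetD fixed_seat_array index 0 - 1
    else if 0 < index ∧ index < L then
      PySem.List.pyGetD fixed_seat_array index 0 - PySem.List.pyGetD fixed_seat_array (index - 1) 0 - 1
    else total_count - PySem.List.pyGetD fixed_seat_array (index - 1) 0
  let seats : Int := if seats = 0 then 1 else seats
  let m : PySem.Dict Int Int :=
    if (st.2.get? seats).isSome then st.2 else (fiboA (seats.toNat + 1) seats st.2).2
  (st.1 * m.getD seats 0, m)

def get_all_ways_of_theater_seat (total_count : Int) (fixed_seat_array : List Int) : Int :=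
  ((PySem.List.pyRange 0 ((fixed_seat_array.length : Int) + 1) 1).foldl
      (bodyA total_count fixed_seat_array)
      (1, PySem.Dict.ofList [(1, 1), (2, 2)])).1

-- ===== PORT B =====
-- _ways(run): (a, b) <- (b, a + b), `run` times, from (1, 1)
def waysB (run : Int) : Int :=
  ((List.range run.toNat).foldl (fun (p : Int × Int) _ => (p.2, p.1 + p.2)) (1, 1)).1

-- occupied[i] = v with Python's negative-index wrap; where Python raises IndexError (still out
-- of range after the wrap) the list is returned unchanged — exactly those inputs B's Python
-- raises on, so no behaviour inside Pre_ depends on that arm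
def pySetBool (xs : List Bool) (i : Int) (v : Bool) : List Bool :=
  let j : Int := if i < 0 then i + xs.length else i
  if 0 ≤ j ∧ j < xs.length then xs.set j.toNat v else xs

def get_all_ways_of_theater_seat_alt (total_count : Int) (fixed_seat_array : List Int) : Int :=
  let occupied := fixed_seat_array.foldl (fun occ seat => pySetBool occ (total_count - seat) true)
    (List.replicate total_count.toNat false)
  let st := occupied.foldl
    (fun (st : Int × Int) taken => if taken then (st.1 * waysB st.2, 0) else (st.1, st.2 + 1))
    (1, 0)
  st.1 * waysB st.2

-- ===== PRECONDITION & SPEC =====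
-- the list of free-seat runs: before the first fixed seat, between neighbours, after the last
def pvGaps (total_count : Int) (fixed_seat_array : List Int) : List Int :=
  (fixed_seat_array.zip (0 :: fixed_seat_array)).map (fun p => p.1 - p.2 - 1)
    ++ [total_count - fixed_seat_array.getLastD 0]

-- Pre_ excludes empty lists (A raises IndexError), negative gaps — unsorted or out-of-range
-- seats, on which A's fibo recurses without bound (RecursionError) — and gaps above 9900, at or
-- beyond the recursion limit, where A's deep recursion raises RecursionError (the exact crash
-- boundary depends on interpreter stack state, so slightly smaller gaps on which A still
-- returns are excluded too; B returns the same product there).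
def Pre_get_all_ways_of_theater_seat (total_count : Int) (fixed_seat_array : List Int) : Prop :=
  fixed_seat_array ≠ [] ∧
    ∀ g ∈ pvGaps total_count fixed_seat_array, 0 ≤ g ∧ g ≤ 9900
instance (total_count : Int) (fixed_seat_array : List Int) : Decidable (Pre_get_all_ways_of_theater_seat total_count fixed_seat_array) := by unfold Pre_get_all_ways_of_theater_seat; infer_instance

def pvWitness_get_all_ways_of_theater_seat : Int × List Int := (10, [3, 7])

def Spec_get_all_ways_of_theater_seat (total_count : Int) (fixed_seat_array : List Int) (out : Int) : Prop := out = get_all_ways_of_theater_seat_alt total_count fixed_seat_array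
instance (total_count : Int) (fixed_seat_array : List Int) (out : Int) : Decidable (Spec_get_all_ways_of_theater_seat total_count fixed_seat_array out) := by unfold Spec_get_all_ways_of_theater_seat; infer_instance

-- ===== CLAIM (what is proved, stated in full; the proofs are below) =====
def Claim_equal_get_all_ways_of_theater_seat : Prop := ∀ (total_count : Int) (fixed_seat_array : List Int), Dom_get_all_ways_of_theater_seat total_count fixed_seat_array → Pre_get_all_ways_of_theater_seat total_count fixed_seat_array → Spec_get_all_ways_of_theater_seat total_count fixed_seat_array (get_all_ways_of_theater_seat total_count fixed_seat_array)

-- ===== LEMMAS AND PROOFS =====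

-- the mathematical sequence both programs compute: Fb 1 = 1, Fb 2 = 2, Fb (n+2) = Fb (n+1) + Fb n
def Fb : Nat → Int
  | 0 => 1
  | 1 => 1
  | n + 2 => Fb (n + 1) + Fb n

-- the factor a gap contributes (a gap of 0 is clamped to 1 before the Fibonacci lookup)
def cFac (g : Int) : Int := Fb (if g = 0 then 1 else g).toNat

-- a memo all of whose entries are correct Fibonacci values, containing the seeds 1 and 2
def GoodM (m : PySem.Dict Int Int) : Prop :=
  m.get? 1 = some 1 ∧ m.get? 2 = some 2 ∧ ∀ k v, m.get? k = some v → v = Fb k.toNat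

theorem goodM_init : GoodM (PySem.Dict.ofList [(1, 1), (2, 2)]) := by
  have e : PySem.Dict.ofList [((1 : Int), (1 : Int)), (2, 2)] = PySem.Dict.mk [(1, 1), (2, 2)] := by
    decide
  refine ⟨by decide, by decide, ?_⟩
  intro k v h
  rw [e, PySem.Dict.get?_mk_cons, PySem.Dict.get?_mk_cons] at h
  split_ifs at h with h1 h2
  · have hk : (1 : Int) = k := by simpa using h1
    subst hk
    obtain rfl : (1 : Int) = v := by simpa using h
    decide
  · have hk : (2 : Int) = k := by simpa using h2
    subst hk
    obtain rfl : (2 : Int) = v := by simpa using h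
    decide
  · rw [show PySem.Dict.mk ([] : List (Int × Int)) = PySem.Dict.empty from rfl] at h
    simp [PySem.Dict.get?_empty] at h

theorem fiboA_spec : ∀ (fuel : Nat) (n : Int) (m : PySem.Dict Int Int), GoodM m → 1 ≤ n →
    n.toNat ≤ fuel →
    (fiboA fuel n m).1 = Fb n.toNat ∧ GoodM (fiboA fuel n m).2 ∧
      (fiboA fuel n m).2.get? n = some (Fb n.toNat) := by
  intro fuel
  induction fuel with
  | zero => intro n m _ h1 hf; omega
  | succ fuel ih =>
    intro n m hm h1 hf
    rcases hg : m.get? n with _ | v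
    · have hn1 : n ≠ 1 := by rintro rfl; rw [hm.1] at hg; cases hg
      have hn2 : n ≠ 2 := by rintro rfl; rw [hm.2.1] at hg; cases hg
      have h3 : 3 ≤ n := by omega
      obtain ⟨ha1, hm1, -⟩ := ih (n - 1) m hm (by omega) (by omega)
      obtain ⟨ha2, hm2, -⟩ := ih (n - 2) (fiboA fuel (n - 1) m).2 hm1 (by omega) (by omega)
      have hv : Fb (n - 1).toNat + Fb (n - 2).toNat = Fb n.toNat := by
        have e2 : (n - 1).toNat = (n - 2).toNat + 1 := by omega
        have e3 : n.toNat = (n - 2).toNat + 2 := by omega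
        rw [e2, e3, Fb]
      have hres : fiboA (fuel + 1) n m
          = ((fiboA fuel (n - 1) m).1 + (fiboA fuel (n - 2) (fiboA fuel (n - 1) m).2).1,
             ((fiboA fuel (n - 2) (fiboA fuel (n - 1) m).2).2).insert n
               ((fiboA fuel (n - 1) m).1 + (fiboA fuel (n - 2) (fiboA fuel (n - 1) m).2).1)) := by
        simp only [fiboA, hg]
      rw [hres]; dsimp only
      refine ⟨by simpa [ha1, ha2] using hv, ⟨?_, ?_, ?_⟩, ?_⟩
      · rw [PySem.Dict.get?_insert_of_ne _ _ (by omega : (1 : Int) ≠ n)]; exact hm2.1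
      · rw [PySem.Dict.get?_insert_of_ne _ _ (by omega : (2 : Int) ≠ n)]; exact hm2.2.1
      · intro k v hk
        by_cases hkn : k = n
        · subst hkn
          rw [PySem.Dict.get?_insert_self _ _ _] at hk
          obtain rfl := Option.some_injective _ hk.symm
          rw [ha1, ha2, hv]
        · rw [PySem.Dict.get?_insert_of_ne _ _ hkn] at hk
          exact hm2.2.2 k v hk
      · rw [PySem.Dict.get?_insert_self _ _ _, ha1, ha2, hv]
    · have hres : fiboA (fuel + 1) n m = (v, m) := by simp only [fiboA, hg]
      rw [hres]; dsimp only
      exact ⟨hm.2.2 n v hg, hm, by rw [hg, hm.2.2 n v hg]⟩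

theorem pvGaps_length (t : Int) (arr : List Int) :
    (pvGaps t arr).length = arr.length + 1 := by
  simp [pvGaps]

theorem pvGaps_elem (t : Int) (arr : List Int) (hne : 1 ≤ arr.length) (i : Nat)
    (hi : i < arr.length + 1) :
    (pvGaps t arr)[i]'(by rw [pvGaps_length]; omega) =
      if i = 0 then arr.getD 0 0 - 1
      else if i < arr.length then arr.getD i 0 - arr.getD (i - 1) 0 - 1
      else t - arr.getD (arr.length - 1) 0 := by
  have hzl : ((arr.zip (0 :: arr)).map (fun p => p.1 - p.2 - 1)).length = arr.length := by
    simp [List.length_zip]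
  by_cases hlt : i < arr.length
  · simp only [pvGaps]
    rw [List.getElem_append_left (by rw [hzl]; exact hlt)]
    rw [List.getElem_map, List.getElem_zip]
    rcases i with _ | j
    · rw [List.getD_eq_getElem _ _ (by omega : 0 < arr.length)]
      simp
    · simp only [List.getElem_cons_succ, if_neg (Nat.succ_ne_zero j), if_pos hlt,
        Nat.add_sub_cancel]
      rw [List.getD_eq_getElem _ _ hlt, List.getD_eq_getElem _ _ (by omega : j < arr.length)]
  · have hie : i = arr.length := by omega
    subst hie
    simp only [pvGaps]
    rw [List.getElem_append_right (le_of_eq hzl)]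
    simp only [hzl, Nat.sub_self, List.getElem_singleton]
    have c1 : ¬(arr.length = 0) := by omega
    have c2 : ¬(arr.length < arr.length) := by omega
    rw [if_neg c1, if_neg c2]
    rw [show arr.getLastD 0 = arr.getD (arr.length - 1) 0 from by
      simp [List.getLastD_eq_getLast?, List.getLast?_eq_getElem?, List.getD_eq_getElem?_getD]]

theorem bodyA_step (t : Int) (arr : List Int) (i : Nat) (hi : i < arr.length + 1)
    (hL : 1 ≤ arr.length) (r : Int) (m : PySem.Dict Int Int) (hm : GoodM m)
    (hg : 0 ≤ (pvGaps t arr)[i]'(by rw [pvGaps_length]; omega)) :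
    ∃ m', bodyA t arr (r, m) (i : Int)
        = (r * cFac ((pvGaps t arr)[i]'(by rw [pvGaps_length]; omega)), m') ∧ GoodM m' := by
  set g : Int := (pvGaps t arr)[i]'(by rw [pvGaps_length]; omega) with hgdef
  have hseats : (if (i : Int) = 0 then PySem.List.pyGetD arr (i : Int) 0 - 1
      else if 0 < (i : Int) ∧ (i : Int) < (arr.length : Int) then
        PySem.List.pyGetD arr (i : Int) 0 - PySem.List.pyGetD arr ((i : Int) - 1) 0 - 1
      else t - PySem.List.pyGetD arr ((i : Int) - 1) 0) = g := by
    rw [hgdef, pvGaps_elem t arr hL i hi]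
    by_cases h0 : i = 0
    · subst h0
      simp [PySem.List.pyGetD_zero, List.getD]
    · rw [if_neg (by exact_mod_cast h0), if_neg h0]
      have hc : ((i : Int) - 1) = ((i - 1 : Nat) : Int) := by omega
      by_cases hlt : i < arr.length
      · rw [if_pos ⟨by exact_mod_cast Nat.pos_of_ne_zero h0, by exact_mod_cast hlt⟩, if_pos hlt]
        rw [hc]
        simp [PySem.List.pyGetD_natCast]
      · rw [if_neg (by omega), if_neg hlt]
        have hie : i = arr.length := by omega
        rw [hc, hie]
        simp [PySem.List.pyGetD_natCast]
  have hbody : bodyA t arr (r, m) (i : Int)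
      = (r * (if ((m.get? (if g = 0 then 1 else g)).isSome) then m
              else (fiboA ((if g = 0 then 1 else g).toNat + 1) (if g = 0 then 1 else g) m).2).getD
                (if g = 0 then 1 else g) 0,
         (if ((m.get? (if g = 0 then 1 else g)).isSome) then m
          else (fiboA ((if g = 0 then 1 else g).toNat + 1) (if g = 0 then 1 else g) m).2)) := by
    simp only [bodyA]
    rw [hseats]
  set s : Int := if g = 0 then 1 else g with hsdef
  have hs1 : 1 ≤ s := by rw [hsdef]; split_ifs <;> omega
  have hcf : cFac g = Fb s.toNat := by rw [cFac, ← hsdef]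
  rcases hms : m.get? s with _ | v
  · obtain ⟨-, hgood, hget⟩ := fiboA_spec (s.toNat + 1) s m hm hs1 (by omega)
    refine ⟨(fiboA (s.toNat + 1) s m).2, ?_, hgood⟩
    rw [hbody]
    rw [if_neg (by rw [hms]; simp)]
    rw [PySem.Dict.getD_of_get?_eq_some _ _ hget, hcf]
  · refine ⟨m, ?_, hm⟩
    rw [hbody]
    rw [if_pos (by rw [hms]; simp)]
    rw [PySem.Dict.getD_of_get?_eq_some _ _ hms, hcf, hm.2.2 s v hms]

theorem loopA (t : Int) (arr : List Int) (hL : 1 ≤ arr.length)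
    (hg : ∀ g ∈ pvGaps t arr, 0 ≤ g) :
    ∀ i, i ≤ arr.length + 1 →
      ∃ m, (List.range i).foldl (fun st (j : Nat) => bodyA t arr st (j : Int))
            (1, PySem.Dict.ofList [(1, 1), (2, 2)])
          = ((((pvGaps t arr).take i).map cFac).prod, m) ∧ GoodM m := by
  intro i
  induction i with
  | zero => intro _; exact ⟨_, by simp, goodM_init⟩
  | succ i ih =>
    intro hi
    obtain ⟨m, heq, hgood⟩ := ih (by omega)
    have hil : i < (pvGaps t arr).length := by rw [pvGaps_length]; omega
    obtain ⟨m', hstep, hgood'⟩ := bodyA_step t arr i (by omega) hL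
      ((((pvGaps t arr).take i).map cFac).prod) m hgood
      (hg _ (List.getElem_mem hil))
    refine ⟨m', ?_, hgood'⟩
    rw [List.range_succ, List.foldl_append, heq]
    simp only [List.foldl_cons, List.foldl_nil]
    rw [hstep]
    have hml : i < ((pvGaps t arr).map cFac).length := by
      rw [List.length_map, pvGaps_length]; omega
    simp only [Prod.mk.injEq]
    refine ⟨?_, trivial⟩
    rw [List.map_take, List.map_take, List.prod_take_succ _ i hml, List.getElem_map]

theorem waysB_fold (k : Nat) :
    (List.range k).foldl (fun (p : Int × Int) _ => (p.2, p.1 + p.2)) (1, 1)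
      = (Fb k, Fb (k + 1)) := by
  induction k with
  | zero => simp [Fb]
  | succ k ih =>
      rw [List.range_succ, List.foldl_append, ih]
      simp only [List.foldl_cons, List.foldl_nil, Fb]
      refine Prod.ext rfl ?_
      dsimp only
      ring

theorem waysB_eq (g : Int) (hg : 0 ≤ g) : waysB g = cFac g := by
  by_cases h0 : g = 0
  · subst h0; decide
  · simp only [waysB, cFac, waysB_fold, if_neg h0]

-- the back-to-front seat mask a well-formed seat list produces: free runs separated by seats
def maskR : Int → Int → List Int → List Bool
  | lo, total, [] => List.replicate (total - lo).toNat false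
  | lo, total, s :: rest =>
      maskR s total rest ++ [true] ++ List.replicate (s - 1 - lo).toNat false

theorem pySetBool_append_left (l1 l2 : List Bool) (i : Int) (v : Bool)
    (h0 : 0 ≤ i) (hi : i < (l1.length : Int)) :
    pySetBool (l1 ++ l2) i v = pySetBool l1 i v ++ l2 := by
  simp only [pySetBool, List.length_append]
  rw [if_neg (by omega : ¬ i < 0), if_neg (by omega : ¬ i < 0)]
  rw [if_pos (by push_cast; omega), if_pos (by omega)]
  rw [List.set_append_left _ _ (by omega)]

theorem set_replicate (n k : Nat) (hk : k < n) :
    (List.replicate n false).set k true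
      = List.replicate k false ++ [true] ++ List.replicate (n - k - 1) false := by
  induction k generalizing n with
  | zero =>
      cases n with
      | zero => omega
      | succ m => simp [List.replicate_succ]
  | succ k ih =>
      cases n with
      | zero => omega
      | succ m =>
          simp only [List.replicate_succ, List.set_cons_succ, List.cons_append]
          rw [ih m (by omega), show m + 1 - (k + 1) - 1 = m - k - 1 from by omega]

theorem occ_build : ∀ (arr : List Int) (lo total : Int) (post : List Bool),
    List.Chain (· < ·) lo arr → (∀ x ∈ arr, x ≤ total) →
    arr.foldl (fun occ seat => pySetBool occ (total - seat) true)
        (List.replicate (total - lo).toNat false ++ post)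
      = maskR lo total arr ++ post := by
  intro arr
  induction arr with
  | nil => intro lo total post _ _; simp [maskR]
  | cons s rest ih =>
      intro lo total post hch hub
      have hlos : lo < s := (List.chain_cons.mp hch).1
      have hst : s ≤ total := hub s (by simp)
      simp only [List.foldl_cons]
      rw [pySetBool_append_left _ _ _ _ (by omega) (by simp [List.length_replicate]; omega)]
      have hset : pySetBool (List.replicate (total - lo).toNat false) (total - s) true
          = List.replicate (total - s).toNat false ++ [true]
              ++ List.replicate (s - 1 - lo).toNat false := by
        simp only [pySetBool, List.length_replicate]
        rw [if_neg (by omega : ¬ (total - s) < 0), if_pos (by constructor <;> omega)]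
        rw [set_replicate _ _ (by omega),
          show (total - lo).toNat - (total - s).toNat - 1 = (s - 1 - lo).toNat from by omega]
      rw [hset]
      have hassoc : (List.replicate (total - s).toNat false ++ [true]
            ++ List.replicate (s - 1 - lo).toNat false) ++ post
          = List.replicate (total - s).toNat false
            ++ ([true] ++ List.replicate (s - 1 - lo).toNat false ++ post) := by
        simp [List.append_assoc]
      rw [hassoc]
      rw [ih s total ([true] ++ List.replicate (s - 1 - lo).toNat false ++ post)
        (List.chain_cons.mp hch).2 (fun x hx => hub x (by simp [hx]))]
      simp [maskR, List.append_assoc]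

-- one step of B's scan, named for the lemmas (definitionally the lambda in the port)
def stepScan (st : Int × Int) (taken : Bool) : Int × Int :=
  if taken then (st.1 * waysB st.2, 0) else (st.1, st.2 + 1)

theorem scan_rep (g : Nat) : ∀ (r run : Int),
    (List.replicate g false).foldl stepScan (r, run) = (r, run + g) := by
  induction g with
  | zero => intro r run; simp
  | succ g ih =>
      intro r run
      simp only [List.replicate_succ, List.foldl_cons, stepScan, if_neg (Bool.false_ne_true)]
      rw [ih]
      congr 1
      omega

theorem scan_maskR : ∀ (arr : List Int) (total lo r : Int), List.Chain (· < ·) lo arr →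
    (∀ x ∈ arr, x ≤ total) → lo ≤ total →
    ((maskR lo total arr).foldl stepScan (r, 0)).1
        * waysB ((maskR lo total arr).foldl stepScan (r, 0)).2
      = r * ((arr.zip (lo :: arr)).map (fun p => cFac (p.1 - p.2 - 1))).prod
          * cFac (total - arr.getLastD lo) := by
  intro arr
  induction arr with
  | nil =>
      intro total lo r _ _ hlo
      simp only [maskR, scan_rep, List.zip_nil_left, List.map_nil, List.prod_nil,
        List.getLastD_nil, mul_one]
      rw [show ((0 : Int) + ((total - lo).toNat : Int)) = ((total - lo).toNat : Int) by ring]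
      rw [waysB_eq _ (by omega), show (((total - lo).toNat : Int)) = total - lo by omega]
  | cons s rest ih =>
      intro total lo r hch hub hlo
      have hlos : lo < s := (List.chain_cons.mp hch).1
      have hst : s ≤ total := hub s (by simp)
      simp only [maskR, List.foldl_append, List.foldl_cons, List.foldl_nil]
      rw [show stepScan ((maskR s total rest).foldl stepScan (r, 0)) true
            = (((maskR s total rest).foldl stepScan (r, 0)).1
                * waysB ((maskR s total rest).foldl stepScan (r, 0)).2, 0) from by
          simp [stepScan]]
      rw [scan_rep]
      dsimp only
      rw [show ((0 : Int) + ((s - 1 - lo).toNat : Int)) = ((s - 1 - lo).toNat : Int) by ring]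
      rw [ih total s r (List.chain_cons.mp hch).2 (fun x hx => hub x (by simp [hx])) hst]
      rw [waysB_eq _ (by omega), show (((s - 1 - lo).toNat : Int)) = s - lo - 1 by omega]
      simp only [List.zip_cons_cons, List.map_cons, List.prod_cons, List.getLastD_cons]
      ring

theorem chain_of_gaps : ∀ (arr : List Int) (p0 : Int),
    (∀ p ∈ arr.zip (p0 :: arr), 0 ≤ p.1 - p.2 - 1) → List.Chain (· < ·) p0 arr := by
  intro arr
  induction arr with
  | nil => intro p0 _; exact List.Chain.nil
  | cons a l ih =>
      intro p0 h
      refine List.chain_cons.mpr ⟨?_, ih a (fun p hp => h p (by simp [hp]))⟩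
      have := h (a, p0) (by simp)
      omega

theorem last_ge : ∀ (arr : List Int) (lo : Int), List.Chain (· < ·) lo arr →
    lo ≤ arr.getLastD lo := by
  intro arr
  induction arr with
  | nil => intro lo _; simp
  | cons a l ih =>
      intro lo hch
      rw [List.getLastD_cons]
      have := ih a (List.chain_cons.mp hch).2
      have := (List.chain_cons.mp hch).1
      omega

theorem le_last : ∀ (arr : List Int) (lo : Int), List.Chain (· < ·) lo arr →
    ∀ x ∈ arr, x ≤ arr.getLastD lo := by
  intro arr
  induction arr with
  | nil => intro lo _ x hx; cases hx
  | cons a l ih =>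
      intro lo hch x hx
      rw [List.getLastD_cons]
      rcases List.mem_cons.mp hx with rfl | hxl
      · exact last_ge l x (List.chain_cons.mp hch).2
      · exact ih a (List.chain_cons.mp hch).2 x hxl

theorem altB_eq (t : Int) (arr : List Int)
    (hch : List.Chain (· < ·) 0 arr) (hub : ∀ x ∈ arr, x ≤ t) (ht : 0 ≤ t) :
    get_all_ways_of_theater_seat_alt t arr = ((pvGaps t arr).map cFac).prod := by
  simp only [get_all_ways_of_theater_seat_alt]
  rw [show List.replicate t.toNat false
        = List.replicate (t - 0).toNat false ++ ([] : List Bool) from by simp]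
  rw [occ_build arr 0 t [] hch hub, List.append_nil]
  rw [show (fun (st : Int × Int) taken =>
        if taken then (st.1 * waysB st.2, 0) else (st.1, st.2 + 1)) = stepScan from rfl]
  rw [scan_maskR arr t 0 1 hch hub ht]
  simp only [pvGaps, List.map_append, List.map_map, List.prod_append, List.map_cons,
    List.map_nil, List.prod_cons, List.prod_nil, mul_one, one_mul, Function.comp_def]

-- ===== VERDICT (by name: the statement is the Claim_ definition above) =====
theorem get_all_ways_of_theater_seat_spec : Claim_equal_get_all_ways_of_theater_seat := by
  intro t arr _ hpre
  obtain ⟨hne, hg⟩ := hpre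
  have hL : 1 ≤ arr.length := by
    cases arr with
    | nil => exact absurd rfl hne
    | cons a l => simp
  have hch : List.Chain (· < ·) 0 arr := by
    refine chain_of_gaps arr 0 (fun p hp => ?_)
    have := hg (p.1 - p.2 - 1) (by
      simp only [pvGaps]
      exact List.mem_append_left _ (List.mem_map_of_mem hp))
    omega
  have hlastle : arr.getLastD 0 ≤ t := by
    have := hg (t - arr.getLastD 0) (by
      simp only [pvGaps]
      exact List.mem_append_right _ (by simp))
    omega
  have hub : ∀ x ∈ arr, x ≤ t := fun x hx => le_trans (le_last arr 0 hch x hx) hlastle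
  have ht : 0 ≤ t := le_trans (last_ge arr 0 hch) hlastle
  unfold Spec_get_all_ways_of_theater_seat
  rw [altB_eq t arr hch hub ht]
  simp only [get_all_ways_of_theater_seat]
  have hcast : ((arr.length : Int) + 1) = ((arr.length + 1 : Nat) : Int) := by push_cast; ring
  rw [hcast, PySem.List.pyRange_zero_natCast, List.foldl_map]
  obtain ⟨m, heq, -⟩ := loopA t arr hL (fun g hgm => (hg g hgm).1) (arr.length + 1) (by omega)
  rw [heq]
  rw [List.take_of_length_le (by rw [pvGaps_length])]
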